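-- pv_equiv track=rewrite | github.com/s-shindeldecker/figment-agent | agents/tier2_enterpret.py | _sanitize_for_env_key
-- ===== SOURCE A (Python) =====
-- def _sanitize_for_env_key(key: str) -> str:
--     out = []
--     for c in key.upper():
--         if c.isalnum():
--             out.append(c)
--         else:
--             out.append("_")
--     s = "".join(out).strip("_")
--     while "__" in s:
--         s = s.replace("__", "_")
--     return s
-- ===== SOURCE B (Python) =====
-- def _sanitize_for_env_key(key: str) -> str:
--     out = []
--     for c in key.upper():
--         if c.isalnum():
--             out.append(c)
--         elif out and out[-1] != "_":
--             out.append("_")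
--     return "".join(out).rstrip("_")
-- ===== Notes on version B (the rewrite author's own statement) =====
-- stated objective: simpler
-- what changed: Single pass that never emits a leading underscore and collapses each run of separators into one underscore as it goes (appending a separator only when the last emitted char is not one), followed by one final right-strip of underscores, replacing A's build-then-strip-then-repeated double-underscore replacement loop.
import Mathlib
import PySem

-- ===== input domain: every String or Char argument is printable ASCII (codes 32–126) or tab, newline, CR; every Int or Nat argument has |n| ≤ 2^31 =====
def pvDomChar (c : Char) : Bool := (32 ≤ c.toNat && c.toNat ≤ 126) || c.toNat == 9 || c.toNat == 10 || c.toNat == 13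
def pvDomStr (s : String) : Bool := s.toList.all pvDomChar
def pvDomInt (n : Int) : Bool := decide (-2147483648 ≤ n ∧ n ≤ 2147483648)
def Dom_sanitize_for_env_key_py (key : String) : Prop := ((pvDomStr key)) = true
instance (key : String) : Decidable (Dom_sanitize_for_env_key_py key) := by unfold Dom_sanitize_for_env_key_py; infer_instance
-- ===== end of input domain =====

-- B: one linear pass that emits no leading underscore and collapses separator runs as it goes, then a
-- single right-strip of underscores; replaces A's build-then-strip-then-repeated-replace while-loop. Objective: simpler.

-- ===== PORT A =====
-- Helpers needed by port A's while-loop for TERMINATION only (the loop strictly shrinks the string):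
-- pvRep describes PySem.Chars.replace s "__" "_", used solely to show its length decreases.
def pvRep : List Char → List Char
  | [] => []
  | [c] => [c]
  | a :: b :: t => if a = '_' ∧ b = '_' then '_' :: pvRep t else a :: pvRep (b :: t)
termination_by l => l.length

theorem pvRep_go (fuel : Nat) : ∀ (l acc : List Char), l.length ≤ fuel →
    PySem.Chars.replace.go ['_', '_'] ['_'] fuel l acc = acc.reverse ++ pvRep l := by
  induction fuel with
  | zero =>
    intro l acc h
    have : l = [] := List.eq_nil_of_length_eq_zero (Nat.le_zero.mp h)
    subst this; simp [PySem.Chars.replace.go, pvRep]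
  | succ n ih =>
    intro l acc h
    match l with
    | [] => simp [PySem.Chars.replace.go, pvRep]
    | [c] =>
      rw [PySem.Chars.replace.go]
      have hpre : (['_', '_'] : List Char).isPrefixOf [c] = false := by simp [List.isPrefixOf]
      rw [hpre]
      simp only [Bool.false_eq_true, if_false]
      rw [ih [] (c :: acc) (by simp)]
      simp [pvRep]
    | a :: b :: t =>
      rw [PySem.Chars.replace.go]
      by_cases hab : a = '_' ∧ b = '_'
      · obtain ⟨rfl, rfl⟩ := hab
        have hpre : (['_', '_'] : List Char).isPrefixOf ('_' :: '_' :: t) = true := by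
          simp [List.isPrefixOf]
        rw [hpre]
        simp only [if_true]
        have ht : t.length ≤ n := by simp at h; omega
        have hdrop : List.drop (['_', '_'] : List Char).length ('_' :: '_' :: t) = t := rfl
        have hrev : (['_'] : List Char).reverse ++ acc = '_' :: acc := rfl
        rw [hdrop, hrev, ih t ('_' :: acc) ht]
        rw [show pvRep ('_' :: '_' :: t) = '_' :: pvRep t from by rw [pvRep]; simp]
        simp
      · have hpre : (['_', '_'] : List Char).isPrefixOf (a :: b :: t) = false := by
          simp [List.isPrefixOf]
          intro h1 h2
          exact hab ⟨h1.symm, h2.symm⟩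
        rw [hpre]
        simp only [Bool.false_eq_true, if_false]
        have hbt : (b :: t).length ≤ n := by simp at h ⊢; omega
        rw [ih (b :: t) (a :: acc) hbt]
        rw [show pvRep (a :: b :: t) = a :: pvRep (b :: t) from by rw [pvRep]; simp [hab]]
        simp

theorem pvRep_replace (s : List Char) :
    PySem.Chars.replace s ['_', '_'] ['_'] = pvRep s := by
  rw [PySem.Chars.replace]
  simp only [List.isEmpty_cons, Bool.false_eq_true, if_false]
  simpa using pvRep_go s.length s [] le_rfl

theorem pvRep_length_le_aux : ∀ (n : Nat) (l : List Char), l.length ≤ n →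
    (pvRep l).length ≤ l.length := by
  intro n
  induction n with
  | zero =>
    intro l h
    have : l = [] := List.eq_nil_of_length_eq_zero (Nat.le_zero.mp h)
    subst this; simp [pvRep]
  | succ n ih =>
    intro l h
    match l with
    | [] => simp [pvRep]
    | [c] => simp [pvRep]
    | a :: b :: t =>
      by_cases hab : a = '_' ∧ b = '_'
      · rw [show pvRep (a :: b :: t) = '_' :: pvRep t from by rw [pvRep]; simp [hab]]
        have ht : t.length ≤ n := by simp at h; omega
        have := ih t ht
        simp at this ⊢; omega
      · rw [show pvRep (a :: b :: t) = a :: pvRep (b :: t) from by rw [pvRep]; simp [hab]]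
        have hbt : (b :: t).length ≤ n := by simp at h ⊢; omega
        have := ih (b :: t) hbt
        simp at this ⊢; omega

theorem pvRep_length_le (l : List Char) : (pvRep l).length ≤ l.length :=
  pvRep_length_le_aux l.length l le_rfl

theorem pvRep_length_lt_aux : ∀ (n : Nat) (s : List Char), s.length ≤ n →
    ['_', '_'] <:+: s → (pvRep s).length < s.length := by
  intro n
  induction n with
  | zero =>
    intro s h hin
    have := hin.length_le
    simp at this
    omega
  | succ n ih =>
    intro s h hin
    match s with
    | [] => have := hin.length_le; simp at this
    | [c] => have := hin.length_le; simp at this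
    | a :: b :: t =>
      by_cases hab : a = '_' ∧ b = '_'
      · rw [show pvRep (a :: b :: t) = '_' :: pvRep t from by rw [pvRep]; simp [hab]]
        have := pvRep_length_le t
        simp; omega
      · have hin' : ['_', '_'] <:+: (b :: t) := by
          rcases List.infix_cons_iff.mp hin with hp | hi
          · obtain ⟨h1, hp'⟩ := List.cons_prefix_cons.mp hp
            obtain ⟨h2, _⟩ := List.cons_prefix_cons.mp hp'
            exact absurd ⟨h1.symm, h2.symm⟩ hab
          · exact hi
        rw [show pvRep (a :: b :: t) = a :: pvRep (b :: t) from by rw [pvRep]; simp [hab]]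
        have hbt : (b :: t).length ≤ n := by simp at h ⊢; omega
        have := ih (b :: t) hbt hin'
        simp at this ⊢; omega

theorem pvRep_length_lt (s : List Char) (h : ['_', '_'] <:+: s) :
    (pvRep s).length < s.length :=
  pvRep_length_lt_aux s.length s le_rfl h

-- the 'while "__" in s: s = s.replace("__", "_")' loop of A
def pvCollapse (s : String) : String :=
  if h : PySem.Str.isIn "__" s then pvCollapse (PySem.Str.replace s "__" "_") else s
termination_by s.toList.length
decreasing_by
  have hin : (['_', '_'] : List Char) <:+: s.toList := by
    have := (PySem.Chars.isIn_iff_infix ("__".toList) s.toList).mp (by simpa [PySem.Str.isIn] using h)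
    simpa using this
  simp only [PySem.Str.replace, String.toList_ofList,
    show ("__" : String).toList = ['_', '_'] from rfl, show ("_" : String).toList = ['_'] from rfl]
  rw [pvRep_replace]
  exact pvRep_length_lt _ hin

def sanitize_for_env_key_py (key : String) : String :=
  let out : List Char := (PySem.Str.upper key).toList.foldl
    (fun out c => if PySem.Chars.isalnum c then out ++ [c] else out ++ ['_']) []
  let s := PySem.Str.stripChars (String.ofList out) "_"
  pvCollapse s

-- ===== PORT B =====
def sanitize_for_env_key_py_alt (key : String) : String :=
  let out : List Char := (PySem.Str.upper key).toList.foldl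
    (fun out c =>
      if PySem.Chars.isalnum c then out ++ [c]
      else if out ≠ [] ∧ out.getLast? ≠ some '_' then out ++ ['_'] else out) []
  -- ''.join(out) then rstrip with an explicit underscore argument, ported step for step
  -- as rdropWhile (exact: drops exactly the trailing underscore characters)
  String.ofList (out.rdropWhile (· == '_'))

-- ===== PRECONDITION & SPEC =====
def Spec_sanitize_for_env_key_py (key : String) (out : String) : Prop := out = sanitize_for_env_key_py_alt key
instance (key : String) (out : String) : Decidable (Spec_sanitize_for_env_key_py key out) := by unfold Spec_sanitize_for_env_key_py; infer_instance

-- ===== CLAIM (what is proved, stated in full; the proofs are below) =====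
def Claim_equal_sanitize_for_env_key_py : Prop := ∀ (key : String), Dom_sanitize_for_env_key_py key → Spec_sanitize_for_env_key_py key (sanitize_for_env_key_py key)

-- ===== LEMMAS AND PROOFS =====

-- squeeze: collapse every run of '_' to a single '_' (the common normal form of both sides)
def pvSq : List Char → List Char
  | [] => []
  | c :: t => if c = '_' then '_' :: pvSq (t.dropWhile (· == '_')) else c :: pvSq t
termination_by l => l.length
decreasing_by
  · have := List.length_dropWhile_le (fun c => c == '_') t
    simp; omega
  · simp

theorem pvRep_cons_of_ne (b : Char) (t : List Char) (hb : b ≠ '_') :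
    pvRep (b :: t) = b :: pvRep t := by
  match t with
  | [] => simp [pvRep]
  | c :: u => rw [pvRep]; simp [hb]

-- pvSq is invariant under one replace("__","_") pass
theorem pvSq_rep_aux : ∀ (n : Nat) (s : List Char), s.length ≤ n →
    pvSq (pvRep s) = pvSq s ∧
    pvSq ((pvRep s).dropWhile (· == '_')) = pvSq (s.dropWhile (· == '_')) := by
  intro n
  induction n with
  | zero =>
    intro s h
    have : s = [] := List.eq_nil_of_length_eq_zero (Nat.le_zero.mp h)
    subst this; simp [pvRep]
  | succ n ih =>
    intro s h
    match s with
    | [] => simp [pvRep]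
    | [c] => simp [pvRep]
    | a :: b :: t =>
      by_cases hab : a = '_' ∧ b = '_'
      · obtain ⟨rfl, rfl⟩ := hab
        have ht : t.length ≤ n := by simp at h; omega
        obtain ⟨_, ih2⟩ := ih t ht
        have hrep : pvRep ('_' :: '_' :: t) = '_' :: pvRep t := by rw [pvRep]; simp
        constructor
        · rw [hrep]
          simp [pvSq, List.dropWhile_cons, ih2]
        · rw [hrep]
          simp [List.dropWhile_cons]
          exact ih2
      · have hbt : (b :: t).length ≤ n := by simp at h ⊢; omega
        obtain ⟨ih1, _⟩ := ih (b :: t) hbt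
        have hrep : pvRep (a :: b :: t) = a :: pvRep (b :: t) := by rw [pvRep]; simp [hab]
        constructor
        · rw [hrep]
          by_cases ha : a = '_'
          · subst ha
            have hb : b ≠ '_' := fun hb => hab ⟨rfl, hb⟩
            have hrb : pvRep (b :: t) = b :: pvRep t := pvRep_cons_of_ne b t hb
            rw [show pvSq ('_' :: pvRep (b :: t)) =
                '_' :: pvSq ((pvRep (b :: t)).dropWhile (· == '_')) from by simp [pvSq]]
            rw [show pvSq ('_' :: b :: t) =
                '_' :: pvSq ((b :: t).dropWhile (· == '_')) from by simp [pvSq]]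
            rw [show (pvRep (b :: t)).dropWhile (· == '_') = pvRep (b :: t) from by
              rw [hrb]; simp [List.dropWhile_cons, hb]]
            rw [show (b :: t).dropWhile (· == '_') = b :: t from by
              simp [List.dropWhile_cons, hb]]
            rw [ih1]
          · simp [pvSq, ha, ih1]
        · by_cases ha : a = '_'
          · subst ha
            have hb : b ≠ '_' := fun hb => hab ⟨rfl, hb⟩
            have hrb : pvRep (b :: t) = b :: pvRep t := pvRep_cons_of_ne b t hb
            have e1 : List.dropWhile (· == '_') ('_' :: pvRep (b :: t)) =
                List.dropWhile (· == '_') (pvRep (b :: t)) := by simp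
            have e2 : List.dropWhile (· == '_') (pvRep (b :: t)) = pvRep (b :: t) := by
              rw [hrb]; simp [List.dropWhile_cons, hb]
            have e3 : List.dropWhile (· == '_') ('_' :: b :: t) = b :: t := by
              simp [List.dropWhile_cons, hb]
            rw [hrep, e1, e2, e3, ih1]
          · rw [hrep]
            simp [List.dropWhile_cons, ha]
            simp [pvSq, ha, ih1]

theorem pvSq_pvRep (s : List Char) : pvSq (pvRep s) = pvSq s :=
  (pvSq_rep_aux s.length s le_rfl).1

-- a string with no "__" is a fixpoint of pvSq
theorem pvSq_fix : ∀ (s : List Char), ¬ (['_', '_'] <:+: s) → pvSq s = s := by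
  intro s
  induction s with
  | nil => intro _; simp [pvSq]
  | cons c t ih =>
    intro h
    have hti : ¬ (['_', '_'] <:+: t) := fun hi => h (List.infix_cons_iff.mpr (Or.inr hi))
    by_cases hc : c = '_'
    · subst hc
      have hhead : t.dropWhile (· == '_') = t := by
        cases t with
        | nil => rfl
        | cons d u =>
          have hd : d ≠ '_' := by
            intro hd; subst hd
            exact h (List.infix_cons_iff.mpr (Or.inl ⟨u, rfl⟩))
          simp [List.dropWhile_cons, hd]
      simp [pvSq, hhead, ih hti]
    · simp [pvSq, hc, ih hti]

-- the while-loop computes pvSq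
theorem pvCollapse_eq_aux : ∀ (n : Nat) (s : String), s.toList.length ≤ n →
    pvCollapse s = String.ofList (pvSq s.toList) := by
  intro n
  induction n with
  | zero =>
    intro s h
    rw [pvCollapse]
    split
    · rename_i hin
      have : (['_', '_'] : List Char) <:+: s.toList := by
        have := (PySem.Chars.isIn_iff_infix ("__".toList) s.toList).mp
          (by simpa [PySem.Str.isIn] using hin)
        simpa using this
      have := this.length_le
      simp only [List.length_cons, List.length_nil] at this
      omega
    · rename_i hin
      have hnin : ¬ (['_', '_'] : List Char) <:+: s.toList := by
        intro hi
        exact hin (by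
          simp only [PySem.Str.isIn]
          exact (PySem.Chars.isIn_iff_infix ("__".toList) s.toList).mpr (by simpa using hi))
      rw [pvSq_fix _ hnin, String.ofList_toList]
  | succ n ih =>
    intro s h
    rw [pvCollapse]
    split
    · rename_i hin
      have hinf : (['_', '_'] : List Char) <:+: s.toList := by
        have := (PySem.Chars.isIn_iff_infix ("__".toList) s.toList).mp
          (by simpa [PySem.Str.isIn] using hin)
        simpa using this
      have htl : (PySem.Str.replace s "__" "_").toList = pvRep s.toList := by
        simp only [PySem.Str.replace, String.toList_ofList,
          show ("__" : String).toList = ['_', '_'] from rfl,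
          show ("_" : String).toList = ['_'] from rfl]
        exact pvRep_replace s.toList
      have hlen : (PySem.Str.replace s "__" "_").toList.length ≤ n := by
        rw [htl]
        have := pvRep_length_lt s.toList hinf
        omega
      rw [ih _ hlen, htl, pvSq_pvRep]
    · rename_i hin
      have hnin : ¬ (['_', '_'] : List Char) <:+: s.toList := by
        intro hi
        exact hin (by
          simp only [PySem.Str.isIn]
          exact (PySem.Chars.isIn_iff_infix ("__".toList) s.toList).mpr (by simpa using hi))
      rw [pvSq_fix _ hnin, String.ofList_toList]

-- B's loop step and the mapped-character function of A
def pvStep (out : List Char) (c : Char) : List Char :=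
  if PySem.Chars.isalnum c then out ++ [c]
  else if out ≠ [] ∧ out.getLast? ≠ some '_' then out ++ ['_'] else out

def pvF (c : Char) : Char := if PySem.Chars.isalnum c then c else '_'

theorem pvFold_acc : ∀ (L acc : List Char), acc ≠ [] →
    (acc.getLast? = some '_' →
      L.foldl pvStep acc = acc ++ pvSq ((L.map pvF).dropWhile (· == '_'))) ∧
    (acc.getLast? ≠ some '_' →
      L.foldl pvStep acc = acc ++ pvSq (L.map pvF)) := by
  intro L
  induction L with
  | nil => intro acc hacc; simp [pvSq]
  | cons c t ih =>
    intro acc hacc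
    by_cases hal : PySem.Chars.isalnum c
    · have hc : c ≠ '_' := by
        intro he; rw [he] at hal; exact absurd hal (by decide)
      have hstep : pvStep acc c = acc ++ [c] := by simp [pvStep, hal]
      have hne : (acc ++ [c]).getLast? ≠ some '_' := by
        rw [List.getLast?_concat]; simp [hc]
      have hrec := (ih (acc ++ [c]) (by simp)).2 hne
      constructor
      · intro _
        simp only [List.foldl_cons, hstep, hrec, List.map_cons]
        rw [show pvF c = c from by simp [pvF, hal]]
        simp [List.dropWhile_cons, hc, pvSq]
      · intro _
        simp only [List.foldl_cons, hstep, hrec, List.map_cons]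
        rw [show pvF c = c from by simp [pvF, hal]]
        simp [pvSq, hc]
    · have hfc : pvF c = '_' := by simp [pvF, hal]
      constructor
      · intro hlastu
        have hstep : pvStep acc c = acc := by simp [pvStep, hal, hlastu]
        have hrec := (ih acc hacc).1 hlastu
        simp only [List.foldl_cons, hstep, hrec, List.map_cons, hfc]
        simp [List.dropWhile_cons]
      · intro hlastu
        have hstep : pvStep acc c = acc ++ ['_'] := by simp [pvStep, hal, hacc, hlastu]
        have hrec := (ih (acc ++ ['_']) (by simp)).1 (by rw [List.getLast?_concat])
        simp only [List.foldl_cons, hstep, hrec, List.map_cons, hfc]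
        simp [pvSq, List.dropWhile_cons]

theorem pvFold_nil : ∀ (L : List Char),
    L.foldl pvStep [] = pvSq ((L.map pvF).dropWhile (· == '_')) := by
  intro L
  induction L with
  | nil => simp [pvSq]
  | cons c t ih =>
    by_cases hal : PySem.Chars.isalnum c
    · have hc : c ≠ '_' := by
        intro he; rw [he] at hal; exact absurd hal (by decide)
      have hstep : pvStep [] c = [c] := by simp [pvStep, hal]
      have hrec := (pvFold_acc t [c] (by simp)).2 (by simp [hc])
      simp only [List.foldl_cons, hstep, hrec, List.map_cons]
      rw [show pvF c = c from by simp [pvF, hal]]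
      simp [List.dropWhile_cons, hc, pvSq]
    · have hfc : pvF c = '_' := by simp [pvF, hal]
      have hstep : pvStep [] c = [] := by simp [pvStep, hal]
      simp only [List.foldl_cons, hstep, ih, List.map_cons, hfc]
      simp [List.dropWhile_cons]

-- all-underscore transfer lemmas (for matching the empty cases of rstrip)
theorem pvForall_drop (u : List Char) :
    (∀ x ∈ List.dropWhile (· == '_') u, x = '_') ↔ (∀ x ∈ u, x = '_') := by
  constructor
  · intro hall x hx
    rw [← List.takeWhile_append_dropWhile (p := (· == '_')) (l := u)] at hx
    rcases List.mem_append.mp hx with hx | hx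
    · exact beq_iff_eq.mp (List.mem_takeWhile_imp (p := (· == '_')) hx)
    · exact hall x hx
  · intro hall x hx
    exact hall x ((List.dropWhile_sublist _).subset hx)

theorem pvSq_all_underscore : ∀ (n : Nat) (t : List Char), t.length ≤ n →
    ((∀ x ∈ pvSq t, x = '_') ↔ (∀ x ∈ t, x = '_')) := by
  intro n
  induction n with
  | zero =>
    intro t h
    have : t = [] := List.eq_nil_of_length_eq_zero (Nat.le_zero.mp h)
    subst this; simp [pvSq]
  | succ n ih =>
    intro t h
    match t with
    | [] => simp [pvSq]
    | c :: u =>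
      by_cases hc : c = '_'
      · subst hc
        have h1 : (u.dropWhile (· == '_')).length ≤ n := by
          have := List.length_dropWhile_le (fun c => c == '_') u
          simp at h; omega
        have ihd := ih (u.dropWhile (· == '_')) h1
        rw [show pvSq ('_' :: u) = '_' :: pvSq (u.dropWhile (· == '_')) from by simp [pvSq]]
        constructor
        · intro hall x hx
          rcases List.mem_cons.mp hx with rfl | hx
          · rfl
          · exact (pvForall_drop u).mp (ihd.mp (fun y hy => hall y (List.mem_cons_of_mem _ hy))) x hx
        · intro hall x hx
          rcases List.mem_cons.mp hx with rfl | hx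
          · rfl
          · exact ihd.mpr ((pvForall_drop u).mpr (fun y hy => hall y (List.mem_cons_of_mem _ hy))) x hx
      · rw [show pvSq (c :: u) = c :: pvSq u from by simp [pvSq, hc]]
        constructor
        · intro hall; exact absurd (hall c (by simp)) hc
        · intro hall; exact absurd (hall c (by simp)) hc

theorem pvSq_all (t : List Char) :
    (∀ x ∈ pvSq t, x = '_') ↔ (∀ x ∈ t, x = '_') :=
  pvSq_all_underscore t.length t le_rfl

theorem pvRdrop_cons (p : Char → Bool) (a : Char) (l : List Char) :
    List.rdropWhile p (a :: l) =
      if List.rdropWhile p l = [] then (if p a then [] else [a])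
      else a :: List.rdropWhile p l := by
  rw [List.rdropWhile, List.reverse_cons, List.dropWhile_append]
  by_cases hd : List.dropWhile p l.reverse = []
  · have hr : List.rdropWhile p l = [] := by simp [List.rdropWhile, hd]
    rw [if_pos hr]
    simp only [hd, List.isEmpty_nil, if_true]
    by_cases hpa : p a <;> simp [hpa, List.dropWhile_cons]
  · have hr : List.rdropWhile p l ≠ [] := by simp [List.rdropWhile, hd]
    rw [if_neg hr]
    have : (List.dropWhile p l.reverse).isEmpty = false := by
      simp [List.isEmpty_eq_false_iff, hd]
    rw [this]
    simp [List.rdropWhile]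

theorem pvDrop_rdrop_comm (p : Char → Bool) : ∀ (u : List Char),
    List.dropWhile p (List.rdropWhile p u) = List.rdropWhile p (List.dropWhile p u) := by
  intro u
  induction u with
  | nil => simp
  | cons c v ih =>
    rw [pvRdrop_cons]
    by_cases hv : List.rdropWhile p v = []
    · rw [if_pos hv]
      have hall : ∀ x ∈ v, p x = true := List.rdropWhile_eq_nil_iff.mp hv
      have hdv : List.dropWhile p v = [] := by
        rw [List.dropWhile_eq_nil_iff]; exact hall
      by_cases hpc : p c = true
      · simp [hpc, List.dropWhile_cons, hdv]
      · simp [List.dropWhile_cons, hpc]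
        rw [pvRdrop_cons, if_pos hv, if_neg (by simp [hpc])]
    · rw [if_neg hv]
      by_cases hpc : p c = true
      · simp only [List.dropWhile_cons, hpc, if_true]
        rw [ih]
      · simp only [List.dropWhile_cons, hpc]
        simp only [Bool.false_eq_true, if_false]
        rw [pvRdrop_cons, if_neg hv]

-- rstrip('_') commutes with pvSq
theorem pvSq_rdrop_aux : ∀ (n : Nat) (t : List Char), t.length ≤ n →
    List.rdropWhile (· == '_') (pvSq t) = pvSq (List.rdropWhile (· == '_') t) := by
  intro n
  induction n with
  | zero =>
    intro t h
    have : t = [] := List.eq_nil_of_length_eq_zero (Nat.le_zero.mp h)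
    subst this; simp [pvSq]
  | succ n ih =>
    intro t h
    match t with
    | [] => simp [pvSq]
    | c :: u =>
      have hu : u.length ≤ n := by simp at h; omega
      by_cases hc : c = '_'
      · subst hc
        rw [show pvSq ('_' :: u) = '_' :: pvSq (u.dropWhile (· == '_')) from by simp [pvSq]]
        rw [pvRdrop_cons, pvRdrop_cons]
        have hiff : (List.rdropWhile (· == '_') (pvSq (u.dropWhile (· == '_'))) = []) ↔
            (List.rdropWhile (· == '_') u = []) := by
          rw [List.rdropWhile_eq_nil_iff, List.rdropWhile_eq_nil_iff]
          simp only [beq_iff_eq]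
          rw [pvSq_all]
          exact pvForall_drop u
        by_cases hA : List.rdropWhile (· == '_') (pvSq (u.dropWhile (· == '_'))) = []
        · rw [if_pos hA, if_pos (hiff.mp hA)]
          simp [pvSq]
        · rw [if_neg hA, if_neg (fun hh => hA (hiff.mpr hh))]
          rw [show pvSq ('_' :: List.rdropWhile (· == '_') u) =
              '_' :: pvSq ((List.rdropWhile (· == '_') u).dropWhile (· == '_')) from by simp [pvSq]]
          congr 1
          rw [ih (u.dropWhile (· == '_')) (le_trans (List.length_dropWhile_le _ _) hu)]
          rw [pvDrop_rdrop_comm]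
      · rw [show pvSq (c :: u) = c :: pvSq u from by simp [pvSq, hc]]
        rw [pvRdrop_cons, pvRdrop_cons]
        have hiff : (List.rdropWhile (· == '_') (pvSq u) = []) ↔
            (List.rdropWhile (· == '_') u = []) := by
          rw [List.rdropWhile_eq_nil_iff, List.rdropWhile_eq_nil_iff]
          simp only [beq_iff_eq]
          exact pvSq_all u
        have hpc : (c == '_') = false := by simp [hc]
        by_cases hA : List.rdropWhile (· == '_') (pvSq u) = []
        · rw [if_pos hA, if_pos (hiff.mp hA), hpc]
          simp [pvSq, hc]
        · rw [if_neg hA, if_neg (fun hh => hA (hiff.mpr hh))]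
          rw [show pvSq (c :: List.rdropWhile (· == '_') u) =
              c :: pvSq (List.rdropWhile (· == '_') u) from by simp [pvSq, hc]]
          congr 1
          exact ih u hu

theorem pvStripChars_eq (m : List Char) :
    PySem.Chars.stripChars m ['_'] =
      List.rdropWhile (· == '_') (List.dropWhile (· == '_') m) := by
  have hq : (fun c : Char => decide (c = '_')) = (fun c : Char => c == '_') := by
    funext c; by_cases h : c = '_' <;> simp [h]
  simp [PySem.Chars.stripChars, List.rdropWhile]
  rw [hq]

-- ===== VERDICT (by name: the statement is the Claim_ definition above) =====
theorem sanitize_for_env_key_py_spec : Claim_equal_sanitize_for_env_key_py := by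
  intro key _
  unfold Spec_sanitize_for_env_key_py sanitize_for_env_key_py sanitize_for_env_key_py_alt
  have hlam : (fun (out : List Char) c =>
      if PySem.Chars.isalnum c then out ++ [c] else out ++ ['_'])
      = (fun (out : List Char) c => out ++ [pvF c]) := by
    funext o c; by_cases h : PySem.Chars.isalnum c <;> simp [pvF, h]
  have hBlam : (fun (out : List Char) c =>
      if PySem.Chars.isalnum c then out ++ [c]
      else if out ≠ [] ∧ out.getLast? ≠ some '_' then out ++ ['_'] else out) = pvStep := rfl
  rw [hlam, PySem.List.foldl_append_singleton_eq_map, hBlam, pvFold_nil]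
  set L := (PySem.Str.upper key).toList with hL
  set m := L.map pvF with hm
  rw [pvCollapse_eq_aux ((PySem.Str.stripChars (String.ofList ([] ++ m)) "_").toList.length) _ le_rfl]
  rw [PySem.Str.toList_stripChars]
  simp only [List.nil_append, String.toList_ofList]
  rw [show ("_" : String).toList = ['_'] from rfl, pvStripChars_eq]
  rw [pvSq_rdrop_aux (m.dropWhile (· == '_')).length _ le_rfl]
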